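-- pv_equiv track=rewrite | github.com/uwdb/vss | vfs/constraints.py | split_up_fragment
-- ===== SOURCE A (Python) =====
-- def split_up_fragment(start, stop, transition_points):
--     sub_fragments = []
--     tp_idx = 0
--     while transition_points[tp_idx] <= start:
--         tp_idx += 1
--
--     begin = start
--     while tp_idx < len(transition_points) and transition_points[tp_idx] <= stop:
--         end = transition_points[tp_idx]
--         sub_fragments.append((begin, end))
--         begin = end
--         tp_idx += 1
--
--     if begin < stop:
--         sub_fragments.append((begin, stop))
--
--     return sub_fragments
-- ===== SOURCE B (Python) =====
-- def split_up_fragment(start, stop, transition_points):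
--     if transition_points[0] <= start:
--         return split_up_fragment(start, stop, transition_points[1:])
--     return _emit(start, stop, transition_points)
--
--
-- def _emit(begin, stop, transition_points):
--     if not transition_points or transition_points[0] > stop:
--         return [(begin, stop)] if begin < stop else []
--     return [(begin, transition_points[0])] + _emit(transition_points[0], stop, transition_points[1:])
-- ===== Notes on version B (the rewrite author's own statement) =====
-- stated objective: simpler
-- what changed: B is a pure structural recursion that builds the result front-to-back with no mutable state, replacing A's index-based while loops over tp_idx/begin/sub_fragments.
import Mathlib
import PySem

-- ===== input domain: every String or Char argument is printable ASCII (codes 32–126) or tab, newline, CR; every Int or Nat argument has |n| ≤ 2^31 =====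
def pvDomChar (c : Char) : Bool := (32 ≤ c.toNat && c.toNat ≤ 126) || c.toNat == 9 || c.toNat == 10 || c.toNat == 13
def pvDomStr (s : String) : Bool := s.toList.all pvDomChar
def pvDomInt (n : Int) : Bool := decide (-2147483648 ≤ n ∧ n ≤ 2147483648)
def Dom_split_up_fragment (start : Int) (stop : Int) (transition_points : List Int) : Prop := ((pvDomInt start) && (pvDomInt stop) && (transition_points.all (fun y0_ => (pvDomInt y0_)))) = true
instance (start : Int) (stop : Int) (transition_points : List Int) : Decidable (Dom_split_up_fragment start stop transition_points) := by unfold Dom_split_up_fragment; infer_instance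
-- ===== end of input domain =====

-- B replaces A's index/accumulator while loops by a pure structural recursion building the result front-to-back (objective: simpler).
-- A raises (IndexError) when every transition point is ≤ start (in particular on the empty list); such inputs are outside Pre_ (B raises IndexError there too).


-- ===== PORT A =====
-- first while loop: advance tp_idx past every transition point ≤ start; none = IndexError
def aSkip (start : Int) : List Int → Option (List Int)
  | [] => none
  | t :: rest => if t ≤ start then aSkip start rest else some (t :: rest)

-- second while loop: state (begin, sub_fragments)
def aLoop (stop : Int) : List Int → Int → List (Int × Int) → Int × List (Int × Int)
  | [], b, acc => (b, acc)
  | t :: rest, b, acc => if t ≤ stop then aLoop stop rest t (acc ++ [(b, t)]) else (b, acc)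

def split_up_fragment (start : Int) (stop : Int) (transition_points : List Int) : List (Int × Int) :=
  match aSkip start transition_points with
  | none => []   -- Python raises IndexError here; excluded by Pre_
  | some rest =>
    let p := aLoop stop rest start []
    if p.1 < stop then p.2 ++ [(p.1, stop)] else p.2

-- ===== PORT B =====
-- helper _emit: pure recursion emitting the sub-fragments front-to-back
def bEmit (begin_ : Int) (stop : Int) : List Int → List (Int × Int)
  | [] => if begin_ < stop then [(begin_, stop)] else []
  | t :: rest => if stop < t then (if begin_ < stop then [(begin_, stop)] else [])
                 else (begin_, t) :: bEmit t stop rest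

def split_up_fragment_alt (start : Int) (stop : Int) (transition_points : List Int) : List (Int × Int) :=
  match transition_points with
  | [] => []   -- Python raises IndexError here; excluded by Pre_
  | t :: rest => if t ≤ start then split_up_fragment_alt start stop rest
                 else bEmit start stop (t :: rest)

-- ===== PRECONDITION & SPEC =====
-- Pre_ excludes exactly the inputs where A raises IndexError: every transition point ≤ start.
def Pre_split_up_fragment (start : Int) (stop : Int) (transition_points : List Int) : Prop :=
  (transition_points.any (fun tp => start < tp)) = true
instance (start : Int) (stop : Int) (transition_points : List Int) : Decidable (Pre_split_up_fragment start stop transition_points) := by unfold Pre_split_up_fragment; infer_instance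
def pvWitness_split_up_fragment : Int × Int × List Int := (0, 10, [3, 7])

def Spec_split_up_fragment (start : Int) (stop : Int) (transition_points : List Int) (out : List (Int × Int)) : Prop := out = split_up_fragment_alt start stop transition_points
instance (start : Int) (stop : Int) (transition_points : List Int) (out : List (Int × Int)) : Decidable (Spec_split_up_fragment start stop transition_points out) := by unfold Spec_split_up_fragment; infer_instance

-- ===== CLAIM (what is proved, stated in full; the proofs are below) =====
def Claim_equal_split_up_fragment : Prop := ∀ (start : Int) (stop : Int) (transition_points : List Int), Dom_split_up_fragment start stop transition_points → Pre_split_up_fragment start stop transition_points → Spec_split_up_fragment start stop transition_points (split_up_fragment start stop transition_points)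

-- ===== LEMMAS AND PROOFS =====

-- A's accumulator loop followed by the final 'if begin < stop' append equals B's emit recursion
lemma emit_eq (stop : Int) (rest : List Int) (b : Int) (acc : List (Int × Int)) :
    (if (aLoop stop rest b acc).1 < stop
       then (aLoop stop rest b acc).2 ++ [((aLoop stop rest b acc).1, stop)]
       else (aLoop stop rest b acc).2) = acc ++ bEmit b stop rest := by
  induction rest generalizing b acc with
  | nil =>
    simp only [aLoop, bEmit]
    split_ifs <;> simp
  | cons t r ih =>
    by_cases h : t ≤ stop
    · rw [show aLoop stop (t :: r) b acc = aLoop stop r t (acc ++ [(b, t)]) from by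
        simp [aLoop, h]]
      rw [ih, bEmit, if_neg (by omega)]
      simp
    · have ht : stop < t := by omega
      rw [show aLoop stop (t :: r) b acc = (b, acc) from by simp [aLoop, h],
        bEmit, if_pos ht]
      split_ifs <;> simp

lemma main_eq (start stop : Int) (tps : List Int) :
    split_up_fragment start stop tps = split_up_fragment_alt start stop tps := by
  induction tps with
  | nil => simp [split_up_fragment, split_up_fragment_alt, aSkip]
  | cons t rest ih =>
    by_cases h : t ≤ start
    · have hA : split_up_fragment start stop (t :: rest) = split_up_fragment start stop rest := by
        simp [split_up_fragment, aSkip, h]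
      rw [hA, ih]
      simp [split_up_fragment_alt, h]
    · simp only [split_up_fragment, split_up_fragment_alt, aSkip, if_neg h]
      simpa using emit_eq stop (t :: rest) start []

-- ===== VERDICT (by name: the statement is the Claim_ definition above) =====
theorem split_up_fragment_spec : Claim_equal_split_up_fragment := by
  intro start stop tps _ _
  unfold Spec_split_up_fragment
  exact main_eq start stop tps
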